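-- pv_equiv track=rewrite | github.com/MikhaelKhalil/femtoRV32 | program_generator/src/Generator.py | _jal_imm_to_bin
-- ===== SOURCE A (Python) =====
-- def _jal_imm_to_bin(imm):
--     # imm >>= 1
--     # if imm < 0:
--     #     imm = (1 << 20) + imm  # twos complement
--
--     # imm_bin = f"{imm:020b}"
--
--     # binary = ["0"] * 32
--     # binary[31] = imm_bin[0]
--     # # binary[21:31] = list(imm_bin[10:20])
--     # # binary[20] = imm_bin[10]
--     # # binary[12:20] = list(imm_bin[1:9])
--     # binary[30:20] = list(imm_bin[10:0:-1])  # imm[10:1], careful with order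
--     # binary[20] = imm_bin[10]       # imm[11]
--     # binary[19:12] = list(imm_bin[1:9])  # imm[19:12]
--
--     # return "".join(binary)
--
--     if imm % 2 != 0:
--         imm = imm - (imm & 1)
--
--     imm_field = imm >> 1
--
--     imm_field &= (1 << 20) - 1
--
--     bit_20 = (imm_field >> 19) & 0x1
--     bits_10_1 = imm_field & ((1 << 10) - 1)
--     bits_11 = (imm_field >> 10) & 0x1
--     bits_19_12 = (imm_field >> 11) & ((1 << 8) - 1)
--
--     binary = ["0"] * 32
--
--     binary[0] = str(bit_20)
--
--     bits_10_1_str = f"{bits_10_1:010b}"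
--
--     for i, ch in enumerate(bits_10_1_str):
--         binary[1 + i] = ch
--
--     binary[11] = str(bits_11)
--
--     bits_19_12_str = f"{bits_19_12:08b}"
--
--     for i, ch in enumerate(bits_19_12_str):
--         binary[12 + i] = ch
--
--
--     return "".join(binary)
-- ===== SOURCE B (Python) =====
-- def _jal_imm_to_bin(imm):
--     if imm % 2 != 0:
--         imm = imm - (imm & 1)
--     imm_field = (imm >> 1) & ((1 << 20) - 1)
--     bit_20 = (imm_field >> 19) & 0x1
--     bits_10_1 = imm_field & ((1 << 10) - 1)
--     bits_11 = (imm_field >> 10) & 0x1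
--     bits_19_12 = (imm_field >> 11) & ((1 << 8) - 1)
--     result = (bit_20 << 31) + (bits_10_1 << 21) + (bits_11 << 20) + (bits_19_12 << 12)
--     return f"{result:032b}"
-- ===== Notes on version B (the rewrite author's own statement) =====
-- stated objective: simpler
-- what changed: B keeps the same field extraction but replaces the per-character list surgery with its two index-writing loops and the join by one integer assembled from the four shifted fields and a single fixed-width binary rendering.
import Mathlib
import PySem

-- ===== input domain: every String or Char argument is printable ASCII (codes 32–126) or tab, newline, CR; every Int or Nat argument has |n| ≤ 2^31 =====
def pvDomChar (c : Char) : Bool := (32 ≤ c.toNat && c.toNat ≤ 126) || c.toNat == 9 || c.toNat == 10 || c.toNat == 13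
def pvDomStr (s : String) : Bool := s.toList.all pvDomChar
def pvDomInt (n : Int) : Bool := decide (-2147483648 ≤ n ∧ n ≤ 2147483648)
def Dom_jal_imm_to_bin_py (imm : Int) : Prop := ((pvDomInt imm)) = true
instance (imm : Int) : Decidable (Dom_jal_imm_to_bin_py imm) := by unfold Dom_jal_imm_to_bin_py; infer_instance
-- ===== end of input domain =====

-- B replaces A's character-list surgery with its two index-writing loops by a single integer
-- assembled from the four fields and one fixed-width binary rendering (objective: simpler).

-- Shared helper: exact port of Python's fixed-width binary format f"{n:0{w}b}" for 0 ≤ n < 2^w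
-- (both Source A and Source B format with it; MSB first).
def pvPadBits (n : Nat) (w : Nat) : List Char :=
  match w with
  | 0 => []
  | w + 1 => pvPadBits (n / 2) w ++ [if n % 2 == 1 then '1' else '0']

-- exact port of Python `str(b)` for b ∈ {0, 1}
def pvBitDigit (b : Int) : Char := if b == 1 then '1' else '0'

-- ===== PORT A =====
-- literal port of the loop `for i, ch in enumerate(s): binary[pos + i] = ch`
def pvWriteAt (binary : List Char) (pos : Nat) (s : List Char) : List Char :=
  match s with
  | [] => binary
  | c :: cs => pvWriteAt (binary.set pos c) (pos + 1) cs

-- Python bitwise on ints ported exactly: `x & ((1 << k) - 1)` = `mod x (2^k)`, `x & 1` = `mod x 2`,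
-- `x >> k` = `floordiv x (2^k)` (floor shift); the list of 1-char strings is ported as List Char,
-- `"".join` as String.mk.
def jal_imm_to_bin_py (imm : Int) : String :=
  let imm1 := if PySem.Int.mod imm 2 ≠ 0 then imm - PySem.Int.mod imm 2 else imm
  let imm_field := PySem.Int.floordiv imm1 2
  let imm_field := PySem.Int.mod imm_field (2 ^ 20)
  let bit_20 := PySem.Int.mod (PySem.Int.floordiv imm_field (2 ^ 19)) 2
  let bits_10_1 := PySem.Int.mod imm_field (2 ^ 10)
  let bits_11 := PySem.Int.mod (PySem.Int.floordiv imm_field (2 ^ 10)) 2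
  let bits_19_12 := PySem.Int.mod (PySem.Int.floordiv imm_field (2 ^ 11)) (2 ^ 8)
  let binary := List.replicate 32 '0'
  let binary := binary.set 0 (pvBitDigit bit_20)
  let bits_10_1_str := pvPadBits bits_10_1.toNat 10
  let binary := pvWriteAt binary 1 bits_10_1_str
  let binary := binary.set 11 (pvBitDigit bits_11)
  let bits_19_12_str := pvPadBits bits_19_12.toNat 8
  let binary := pvWriteAt binary 12 bits_19_12_str
  String.mk binary

-- ===== PORT B =====
-- same preprocessing and field extraction as Source B, then `<< k` ported as `* 2^k`,
-- the sum assembled into one integer and formatted with the 32-wide binary helper.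
def jal_imm_to_bin_py_alt (imm : Int) : String :=
  let imm1 := if PySem.Int.mod imm 2 ≠ 0 then imm - PySem.Int.mod imm 2 else imm
  let imm_field := PySem.Int.mod (PySem.Int.floordiv imm1 2) (2 ^ 20)
  let bit_20 := PySem.Int.mod (PySem.Int.floordiv imm_field (2 ^ 19)) 2
  let bits_10_1 := PySem.Int.mod imm_field (2 ^ 10)
  let bits_11 := PySem.Int.mod (PySem.Int.floordiv imm_field (2 ^ 10)) 2
  let bits_19_12 := PySem.Int.mod (PySem.Int.floordiv imm_field (2 ^ 11)) (2 ^ 8)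
  let result := bit_20 * 2 ^ 31 + bits_10_1 * 2 ^ 21 + bits_11 * 2 ^ 20 + bits_19_12 * 2 ^ 12
  String.mk (pvPadBits result.toNat 32)

-- ===== PRECONDITION & SPEC =====
def Spec_jal_imm_to_bin_py (imm : Int) (out : String) : Prop := out = jal_imm_to_bin_py_alt imm
instance (imm : Int) (out : String) : Decidable (Spec_jal_imm_to_bin_py imm out) := by unfold Spec_jal_imm_to_bin_py; infer_instance

-- ===== CLAIM (what is proved, stated in full; the proofs are below) =====
def Claim_equal_jal_imm_to_bin_py : Prop := ∀ (imm : Int), Dom_jal_imm_to_bin_py imm → Spec_jal_imm_to_bin_py imm (jal_imm_to_bin_py imm)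

-- ===== LEMMAS AND PROOFS =====

theorem pvPadBits_length (n w : Nat) : (pvPadBits n w).length = w := by
  induction w generalizing n with
  | zero => rfl
  | succ w ih => simp [pvPadBits, ih]

theorem pvPadBits_zero (w : Nat) : pvPadBits 0 w = List.replicate w '0' := by
  induction w with
  | zero => rfl
  | succ w ih => simp [pvPadBits, ih, List.replicate_succ']

theorem pvPadBits_split (a b v w : Nat) (hb : b < 2 ^ w) :
    pvPadBits (a * 2 ^ w + b) (v + w) = pvPadBits a v ++ pvPadBits b w := by
  induction w generalizing b with
  | zero =>
    interval_cases b
    simp [pvPadBits]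
  | succ w ih =>
    have hrw : a * 2 ^ (w + 1) + b = (a * 2 ^ w) * 2 + b := by ring
    have h1 : (a * 2 ^ (w + 1) + b) / 2 = a * 2 ^ w + b / 2 := by
      rw [hrw]; omega
    have h2 : (a * 2 ^ (w + 1) + b) % 2 = b % 2 := by
      rw [hrw]; omega
    have hb2 : b / 2 < 2 ^ w := by
      rw [pow_succ] at hb; omega
    show pvPadBits _ ((v + w) + 1) = _
    rw [pvPadBits, h1, h2, ih _ hb2, pvPadBits, List.append_assoc]

theorem pvPadBits_one (b : Nat) (hb : b < 2) :
    pvPadBits b 1 = [if b == 1 then '1' else '0'] := by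
  interval_cases b <;> rfl

-- writing a list of length ys.length at offset xs.length splices it in place of ys
theorem pvWriteAt_splice (s : List Char) : ∀ (xs ys zs : List Char), s.length = ys.length →
    pvWriteAt (xs ++ ys ++ zs) xs.length s = xs ++ s ++ zs := by
  induction s with
  | nil =>
    intro xs ys zs h
    have : ys = [] := List.eq_nil_of_length_eq_zero h.symm
    simp [pvWriteAt, this]
  | cons c cs ih =>
    intro xs ys zs h
    cases ys with
    | nil => simp at h
    | cons y ys' =>
      have hset : (xs ++ (y :: ys') ++ zs).set xs.length c = (xs ++ [c]) ++ ys' ++ zs := by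
        rw [List.append_assoc, List.set_append_right _ _ (le_refl _)]
        simp
      rw [pvWriteAt, hset]
      have := ih (xs ++ [c]) ys' zs (by simpa using h)
      simpa using this

theorem pv_set_splice (xs : List Char) (y : Char) (t : List Char) (c : Char) :
    (xs ++ y :: t).set xs.length c = xs ++ c :: t := by
  rw [List.set_append_right _ _ (le_refl _)]
  simp

-- the common core: for 0 ≤ f < 2^20, A's list surgery and B's single rendering agree
set_option maxHeartbeats 1600000 in
theorem pv_core (f : Int) (hf0 : 0 ≤ f) (hflt : f < 2 ^ 20) :
    String.mk (pvWriteAt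
      ((pvWriteAt ((List.replicate 32 '0').set 0
          (pvBitDigit (PySem.Int.mod (PySem.Int.floordiv f (2 ^ 19)) 2)))
        1 (pvPadBits (PySem.Int.mod f (2 ^ 10)).toNat 10)).set 11
          (pvBitDigit (PySem.Int.mod (PySem.Int.floordiv f (2 ^ 10)) 2)))
      12 (pvPadBits (PySem.Int.mod (PySem.Int.floordiv f (2 ^ 11)) (2 ^ 8)).toNat 8))
    = String.mk (pvPadBits
        (PySem.Int.mod (PySem.Int.floordiv f (2 ^ 19)) 2 * 2 ^ 31
          + PySem.Int.mod f (2 ^ 10) * 2 ^ 21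
          + PySem.Int.mod (PySem.Int.floordiv f (2 ^ 10)) 2 * 2 ^ 20
          + PySem.Int.mod (PySem.Int.floordiv f (2 ^ 11)) (2 ^ 8) * 2 ^ 12).toNat 32) := by
  set n := f.toNat with hn
  have hfn : f = (n : Int) := by omega
  have hnlt : n < 2 ^ 20 := by omega
  set b20 := PySem.Int.mod (PySem.Int.floordiv f (2 ^ 19)) 2 with hb20
  set b101 := PySem.Int.mod f (2 ^ 10) with hb101
  set b11 := PySem.Int.mod (PySem.Int.floordiv f (2 ^ 10)) 2 with hb11
  set b1912 := PySem.Int.mod (PySem.Int.floordiv f (2 ^ 11)) (2 ^ 8) with hb1912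
  have e20 : b20 = ((n / 2 ^ 19 % 2 : Nat) : Int) := by
    rw [hb20, hfn, show ((2:Int) ^ 19) = ((2 ^ 19 : Nat) : Int) by norm_num,
      PySem.Int.floordiv_natCast, show ((2:Int)) = ((2 : Nat) : Int) by norm_num,
      PySem.Int.mod_natCast]
  have e101 : b101 = ((n % 2 ^ 10 : Nat) : Int) := by
    rw [hb101, hfn, show ((2:Int) ^ 10) = ((2 ^ 10 : Nat) : Int) by norm_num,
      PySem.Int.mod_natCast]
  have e11 : b11 = ((n / 2 ^ 10 % 2 : Nat) : Int) := by
    rw [hb11, hfn, show ((2:Int) ^ 10) = ((2 ^ 10 : Nat) : Int) by norm_num,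
      PySem.Int.floordiv_natCast, show ((2:Int)) = ((2 : Nat) : Int) by norm_num,
      PySem.Int.mod_natCast]
  have e1912 : b1912 = ((n / 2 ^ 11 % 2 ^ 8 : Nat) : Int) := by
    rw [hb1912, hfn, show ((2:Int) ^ 11) = ((2 ^ 11 : Nat) : Int) by norm_num,
      PySem.Int.floordiv_natCast, show ((2:Int) ^ 8) = ((2 ^ 8 : Nat) : Int) by norm_num,
      PySem.Int.mod_natCast]
  set m20 := n / 2 ^ 19 % 2 with hm20
  set m101 := n % 2 ^ 10 with hm101
  set m11 := n / 2 ^ 10 % 2 with hm11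
  set m1912 := n / 2 ^ 11 % 2 ^ 8 with hm1912
  have hm20lt : m20 < 2 := Nat.mod_lt _ (by norm_num)
  have hm101lt : m101 < 2 ^ 10 := Nat.mod_lt _ (by norm_num)
  have hm11lt : m11 < 2 := Nat.mod_lt _ (by norm_num)
  have hm1912lt : m1912 < 2 ^ 8 := Nat.mod_lt _ (by norm_num)
  -- B side: the assembled integer and its 32-bit rendering
  have hres : (b20 * 2 ^ 31 + b101 * 2 ^ 21 + b11 * 2 ^ 20 + b1912 * 2 ^ 12).toNat
      = ((((m20 * 2 ^ 10 + m101) * 2 ^ 1 + m11) * 2 ^ 8 + m1912) * 2 ^ 12 + 0) := by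
    rw [e20, e101, e11, e1912]
    rw [show ((m20 : Int) * 2 ^ 31 + (m101 : Int) * 2 ^ 21 + (m11 : Int) * 2 ^ 20
        + (m1912 : Int) * 2 ^ 12)
      = (((m20 * 2 ^ 31 + m101 * 2 ^ 21 + m11 * 2 ^ 20 + m1912 * 2 ^ 12 : Nat)) : Int) by
        push_cast; ring]
    rw [Int.toNat_natCast]
    omega
  have hB : pvPadBits (b20 * 2 ^ 31 + b101 * 2 ^ 21 + b11 * 2 ^ 20 + b1912 * 2 ^ 12).toNat 32
      = pvPadBits m20 1 ++ pvPadBits m101 10 ++ pvPadBits m11 1 ++ pvPadBits m1912 8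
        ++ List.replicate 12 '0' := by
    rw [hres]
    have s1 := pvPadBits_split ((((m20 * 2 ^ 10 + m101) * 2 ^ 1 + m11) * 2 ^ 8 + m1912)) 0 20 12 (by norm_num)
    have s2 := pvPadBits_split (((m20 * 2 ^ 10 + m101) * 2 ^ 1 + m11)) m1912 12 8 hm1912lt
    have s3 := pvPadBits_split ((m20 * 2 ^ 10 + m101)) m11 11 1 hm11lt
    have s4 := pvPadBits_split m20 m101 1 10 hm101lt
    norm_num at s1 s2 s3 s4 ⊢
    rw [s1, s2, s3, s4, pvPadBits_zero]
    simp [List.append_assoc]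
  -- A side: the digits and field widths
  have hdig20 : pvBitDigit b20 = (if m20 == 1 then '1' else '0') := by
    rw [e20]
    rcases (by omega : m20 = 0 ∨ m20 = 1) with h | h <;> simp [h, pvBitDigit]
  have hdig11 : pvBitDigit b11 = (if m11 == 1 then '1' else '0') := by
    rw [e11]
    rcases (by omega : m11 = 0 ∨ m11 = 1) with h | h <;> simp [h, pvBitDigit]
  have ht101 : b101.toNat = m101 := by rw [e101]; omega
  have ht1912 : b1912.toNat = m1912 := by rw [e1912]; omega
  have len101 : (pvPadBits b101.toNat 10).length = 10 := pvPadBits_length _ _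
  have len1912 : (pvPadBits b1912.toNat 8).length = 8 := pvPadBits_length _ _
  -- the four surgery steps, as splices
  have step1 : (List.replicate 32 '0').set 0 (pvBitDigit b20)
      = [pvBitDigit b20] ++ List.replicate 31 '0' := by
    simp [List.replicate_succ]
  have step2 : pvWriteAt ([pvBitDigit b20] ++ List.replicate 31 '0') 1 (pvPadBits b101.toNat 10)
      = [pvBitDigit b20] ++ pvPadBits b101.toNat 10 ++ List.replicate 21 '0' := by
    have := pvWriteAt_splice (pvPadBits b101.toNat 10) [pvBitDigit b20]
      (List.replicate 10 '0') (List.replicate 21 '0') (by simp [len101])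
    simpa [show List.replicate 10 '0' ++ List.replicate 21 '0' = List.replicate 31 '0' by
      rw [List.replicate_append_replicate]] using this
  have step3 : ([pvBitDigit b20] ++ pvPadBits b101.toNat 10 ++ List.replicate 21 '0').set 11
        (pvBitDigit b11)
      = [pvBitDigit b20] ++ pvPadBits b101.toNat 10 ++ ([pvBitDigit b11] ++ List.replicate 20 '0') := by
    have h21 : List.replicate 21 '0' = '0' :: List.replicate 20 '0' := by
      simp [List.replicate_succ]
    have hlen : ([pvBitDigit b20] ++ pvPadBits b101.toNat 10).length = 11 := by
      simp [len101]
    rw [h21, ← List.append_assoc, ← hlen, pv_set_splice]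
    simp [List.append_assoc]
  have step4 : pvWriteAt ([pvBitDigit b20] ++ pvPadBits b101.toNat 10
        ++ ([pvBitDigit b11] ++ List.replicate 20 '0')) 12 (pvPadBits b1912.toNat 8)
      = [pvBitDigit b20] ++ pvPadBits b101.toNat 10 ++ [pvBitDigit b11]
        ++ pvPadBits b1912.toNat 8 ++ List.replicate 12 '0' := by
    have hlen : ([pvBitDigit b20] ++ pvPadBits b101.toNat 10 ++ [pvBitDigit b11]).length = 12 := by
      simp [len101]
    have h20 : List.replicate 20 '0' = List.replicate 8 '0' ++ List.replicate 12 '0' := by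
      rw [List.replicate_append_replicate]
    have := pvWriteAt_splice (pvPadBits b1912.toNat 8)
      ([pvBitDigit b20] ++ pvPadBits b101.toNat 10 ++ [pvBitDigit b11])
      (List.replicate 8 '0') (List.replicate 12 '0') (by simp [len1912])
    rw [hlen] at this
    calc pvWriteAt ([pvBitDigit b20] ++ pvPadBits b101.toNat 10
          ++ ([pvBitDigit b11] ++ List.replicate 20 '0')) 12 (pvPadBits b1912.toNat 8)
        = pvWriteAt (([pvBitDigit b20] ++ pvPadBits b101.toNat 10 ++ [pvBitDigit b11])
            ++ List.replicate 8 '0' ++ List.replicate 12 '0') 12 (pvPadBits b1912.toNat 8) := by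
          rw [h20]; simp [List.append_assoc]
      _ = _ := by rw [this]
  rw [step1, step2, step3, step4, hB]
  refine congrArg String.mk ?_
  rw [ht101, ht1912, hdig20, hdig11,
    pvPadBits_one m20 hm20lt, pvPadBits_one m11 hm11lt]

-- ===== VERDICT (by name: the statement is the Claim_ definition above) =====
set_option maxHeartbeats 1000000 in
theorem jal_imm_to_bin_py_spec : Claim_equal_jal_imm_to_bin_py := by
  intro imm _
  unfold Spec_jal_imm_to_bin_py jal_imm_to_bin_py jal_imm_to_bin_py_alt
  have hfd : 0 ≤ PySem.Int.mod (PySem.Int.floordiv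
        (if PySem.Int.mod imm 2 ≠ 0 then imm - PySem.Int.mod imm 2 else imm) 2) (2 ^ 20)
      ∧ PySem.Int.mod (PySem.Int.floordiv
        (if PySem.Int.mod imm 2 ≠ 0 then imm - PySem.Int.mod imm 2 else imm) 2) (2 ^ 20) < 2 ^ 20 := by
    rw [PySem.Int.mod_eq_emod_of_pos (by norm_num)]
    constructor
    · exact Int.emod_nonneg _ (by norm_num)
    · exact Int.emod_lt_of_pos _ (by norm_num)
  exact pv_core _ hfd.1 hfd.2
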